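-- pv_equiv track=rewrite | github.com/maltesie/RNASeqViz | Workspace.py | get_inserts
-- ===== SOURCE A (Python) =====
-- def get_inserts(sequence):
--     sequence_counter = 0
--     insert_counter = 0
--     insertions = []
--     for nuti in sequence:
--         if nuti != '-':
--             if insert_counter != 0:
--                 insertions.append((sequence_counter, insert_counter))
--                 insert_counter = 0
--             sequence_counter += 1
--         else:
--             insert_counter += 1
--     if insert_counter != 0: insertions.append((sequence_counter, insert_counter))
--     return insertions
-- ===== SOURCE B (Python) =====
-- def get_inserts(sequence):
--     # Stage 1: collect the indices of every gap character.
--     gaps = [i for i, c in enumerate(sequence) if c == '-']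
--     # Stage 2: group consecutive indices; a gap at string index i preceded by
--     # j earlier gaps sits after i - j real characters, so a run starting there
--     # is reported at position i - j.
--     runs = []
--     prev = None
--     for j, i in enumerate(gaps):
--         if prev is not None and i == prev + 1:
--             pos, length = runs[-1]
--             runs[-1] = (pos, length + 1)
--         else:
--             runs.append((i - j, 1))
--         prev = i
--     return runs
-- ===== Notes on version B (the rewrite author's own statement) =====
-- stated objective: alternative
-- what changed: B first extracts the list of gap indices with an enumerate/filter pass, then groups consecutive indices in a second pass, computing each run's position by the closed form index-minus-rank (i - j) and extending the last run tuple in place, instead of A's per-character state machine with sequence/insert counters and a final flush.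
import Mathlib
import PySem

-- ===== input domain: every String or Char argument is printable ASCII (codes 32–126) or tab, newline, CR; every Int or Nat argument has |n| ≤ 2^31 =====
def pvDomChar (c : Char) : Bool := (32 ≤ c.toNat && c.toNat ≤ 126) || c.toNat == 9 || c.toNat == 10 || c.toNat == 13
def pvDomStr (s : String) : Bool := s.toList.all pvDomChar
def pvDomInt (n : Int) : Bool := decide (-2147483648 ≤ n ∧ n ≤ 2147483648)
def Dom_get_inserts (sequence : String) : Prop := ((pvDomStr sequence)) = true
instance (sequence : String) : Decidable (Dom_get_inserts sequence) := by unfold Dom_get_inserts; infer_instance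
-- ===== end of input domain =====

-- B replaces A's per-character counter state machine by two staged passes: extract the
-- gap indices, then group consecutive indices with the closed form position = i - j
-- (objective: alternative, same cost).

-- ===== PORT A =====
-- A's for-loop over the characters, state (sequence_counter, insert_counter, insertions)
def pvALoop : List Char → Int × Int × List (Int × Int) → Int × Int × List (Int × Int)
  | [], st => st
  | c :: rest, (sc, ic, ins) =>
    pvALoop rest
      (if c ≠ '-' then
        (if ic ≠ 0 then (sc + 1, 0, ins ++ [(sc, ic)]) else (sc + 1, ic, ins))
      else (sc, ic + 1, ins))

def get_inserts (sequence : String) : List (Int × Int) :=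
  let st := pvALoop sequence.toList (0, 0, [])
  if st.2.1 ≠ 0 then st.2.2 ++ [(st.1, st.2.1)] else st.2.2

-- ===== PORT B =====
-- [i for i, c in enumerate(sequence) if c == '-']
def pvGaps (i : Int) : List Char → List Int
  | [] => []
  | c :: rest => if c == '-' then i :: pvGaps (i + 1) rest else pvGaps (i + 1) rest

-- runs[-1] = (pos, length + 1)
def pvBumpLast : List (Int × Int) → List (Int × Int)
  | [] => []
  | [(p, l)] => [(p, l + 1)]
  | x :: rest => x :: pvBumpLast rest

-- Source B's for-loop over enumerate(gaps), state (j, prev, runs)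
def pvGroup : Int → Option Int → List (Int × Int) → List Int → List (Int × Int)
  | _, _, runs, [] => runs
  | j, prev, runs, i :: t =>
    if (match prev with | some p => i == p + 1 | none => false) then
      pvGroup (j + 1) (some i) (pvBumpLast runs) t
    else
      pvGroup (j + 1) (some i) (runs ++ [(i - j, 1)]) t

def get_inserts_alt (sequence : String) : List (Int × Int) :=
  pvGroup 0 none [] (pvGaps 0 sequence.toList)

-- ===== PRECONDITION & SPEC =====
def Spec_get_inserts (sequence : String) (out : List (Int × Int)) : Prop := out = get_inserts_alt sequence
instance (sequence : String) (out : List (Int × Int)) : Decidable (Spec_get_inserts sequence out) := by unfold Spec_get_inserts; infer_instance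

-- ===== CLAIM =====
def Claim_equal_get_inserts : Prop := ∀ (sequence : String), Dom_get_inserts sequence → Spec_get_inserts sequence (get_inserts sequence)

-- ===== LEMMAS AND PROOFS =====

-- finalize A's loop state as the function does after the loop
def pvFin (st : Int × Int × List (Int × Int)) : List (Int × Int) :=
  if st.2.1 ≠ 0 then st.2.2 ++ [(st.1, st.2.1)] else st.2.2

lemma pvBumpLast_append (l : List (Int × Int)) (p m : Int) :
    pvBumpLast (l ++ [(p, m)]) = l ++ [(p, m + 1)] := by
  induction l with
  | nil => simp [pvBumpLast]
  | cons x t ih =>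
    cases t with
    | nil => simp [pvBumpLast]
    | cons y u => simpa [pvBumpLast] using ih

-- Main invariant, both phases at once.
-- Phase A (between runs, insert_counter = 0): prev is none or an old gap index < sc+j-1.
-- Phase B (inside a gap run of length n+1): B's runs already hold the open run (sc, n+1)
-- as last element, prev is the gap index sc+j-1, and A will flush it later.
lemma pv_main (l : List Char) :
    (∀ (sc j : Int) (ins : List (Int × Int)) (prev : Option Int),
        (∀ p, prev = some p → p < sc + j - 1) →
        pvFin (pvALoop l (sc, 0, ins)) = pvGroup j prev ins (pvGaps (sc + j) l)) ∧
    (∀ (sc j : Int) (n : Nat) (ins : List (Int × Int)),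
        pvFin (pvALoop l (sc, (n : Int) + 1, ins))
          = pvGroup j (some (sc + j - 1)) (ins ++ [(sc, (n : Int) + 1)]) (pvGaps (sc + j) l)) := by
  induction l with
  | nil =>
    constructor
    · intro sc j ins prev _
      simp [pvALoop, pvGaps, pvGroup, pvFin]
    · intro sc j n ins
      have hn : ((n : Int) + 1) ≠ 0 := by omega
      simp only [pvALoop, pvGaps, pvGroup, pvFin, if_pos hn]
  | cons c rest ih =>
    obtain ⟨ihA, ihB⟩ := ih
    constructor
    · intro sc j ins prev hprev
      by_cases hc : c = '-'
      · subst hc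
        have h1 : pvALoop ('-' :: rest) (sc, 0, ins) = pvALoop rest (sc, 1, ins) := by
          simp [pvALoop]
        have h2 := ihB sc (j + 1) 0 ins
        simp only [Nat.cast_zero, zero_add,
          show sc + (j + 1) = sc + j + 1 from by ring] at h2
        rw [h1, h2]
        cases prev with
        | none => simp [pvGaps, pvGroup]
        | some p =>
          have hp := hprev p rfl
          have hcond : (sc + j == p + 1) = false := by simp; omega
          simp [pvGaps, pvGroup, hcond]
      · have hb : (c == '-') = false := by simp [hc]
        have h1 : pvALoop (c :: rest) (sc, 0, ins) = pvALoop rest (sc + 1, 0, ins) := by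
          simp [pvALoop, hc]
        rw [h1]
        have hprev' : ∀ p, prev = some p → p < (sc + 1) + j - 1 := by
          intro p hp; have := hprev p hp; omega
        have h2 := ihA (sc + 1) j ins prev hprev'
        have : sc + 1 + j = sc + j + 1 := by ring
        rw [this] at h2
        rw [h2]
        simp [pvGaps, hb]
    · intro sc j n ins
      by_cases hc : c = '-'
      · subst hc
        have h1 : pvALoop ('-' :: rest) (sc, (n : Int) + 1, ins)
            = pvALoop rest (sc, (n : Int) + 1 + 1, ins) := by simp [pvALoop]
        have h2 := ihB sc (j + 1) (n + 1) ins
        push_cast at h2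
        rw [h1]
        simp only [show sc + (j + 1) = sc + j + 1 from by ring] at h2
        have h2' : pvFin (pvALoop rest (sc, (n : Int) + 1 + 1, ins))
            = pvGroup (j + 1) (some (sc + j)) (ins ++ [(sc, (n : Int) + 1 + 1)]) (pvGaps (sc + j + 1) rest) := by
          convert h2 using 3 <;> ring
        rw [h2']
        have hcond : (match some (sc + j - 1) with | some p => sc + j == p + 1 | none => false) = true := by
          simp
        simp only [pvGaps, pvGroup, hcond, if_true, beq_self_eq_true, pvBumpLast_append]
      · have hb : (c == '-') = false := by simp [hc]
        have hn : ((n : Int) + 1) ≠ 0 := by omega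
        have h1 : pvALoop (c :: rest) (sc, (n : Int) + 1, ins)
            = pvALoop rest (sc + 1, 0, ins ++ [(sc, (n : Int) + 1)]) := by
          simp [pvALoop, hc, hn]
        rw [h1]
        have hprev' : ∀ p, some (sc + j - 1) = some p → p < (sc + 1) + j - 1 := by
          intro p hp; injection hp with hp; omega
        have h2 := ihA (sc + 1) j (ins ++ [(sc, (n : Int) + 1)]) (some (sc + j - 1)) hprev'
        have : sc + 1 + j = sc + j + 1 := by ring
        rw [this] at h2
        rw [h2]
        simp [pvGaps, hb]

-- ===== VERDICT =====
theorem get_inserts_spec : Claim_equal_get_inserts := by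
  intro s _
  unfold Spec_get_inserts get_inserts get_inserts_alt
  show pvFin (pvALoop s.toList (0, 0, [])) = _
  have h := (pv_main s.toList).1 0 0 [] none (by intro p hp; cases hp)
  simpa using h
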